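-- pv_equiv track=rewrite | github.com/KHUSHI8924/SYNONYMOUS-VS-NON-SYNONYMOUS-MUTATION-COUNTER- | mutation.py | count_syn_nonsyn
-- ===== SOURCE A (Python) =====
-- CODON_TABLE = {
--     'ATA':'I','ATC':'I','ATT':'I','ATG':'M',
--     'ACA':'T','ACC':'T','ACG':'T','ACT':'T',
--     'AAC':'N','AAT':'N','AAA':'K','AAG':'K',
--     'AGC':'S','AGT':'S','AGA':'R','AGG':'R',
--     'CTA':'L','CTC':'L','CTG':'L','CTT':'L',
--     'CCA':'P','CCC':'P','CCG':'P','CCT':'P',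
--     'CAC':'H','CAT':'H','CAA':'Q','CAG':'Q',
--     'CGA':'R','CGC':'R','CGG':'R','CGT':'R',
--     'GTA':'V','GTC':'V','GTG':'V','GTT':'V',
--     'GCA':'A','GCC':'A','GCG':'A','GCT':'A',
--     'GAC':'D','GAT':'D','GAA':'E','GAG':'E',
--     'GGA':'G','GGC':'G','GGG':'G','GGT':'G',
--     'TCA':'S','TCC':'S','TCG':'S','TCT':'S',
--     'TTC':'F','TTT':'F','TTA':'L','TTG':'L',
--     'TAC':'Y','TAT':'Y','TAA':'Stop','TAG':'Stop',
--     'TGC':'C','TGT':'C','TGA':'Stop','TGG':'W'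
-- }
--
-- def translate_codon(codon):
--     codon = codon.upper()
--     if len(codon) != 3:
--         return "invalid codon"
--     return CODON_TABLE.get(codon, 'X')
--
-- def count_syn_nonsyn(s1, s2):
--     if len(s1) != len(s2):
--         raise ValueError("SEQUENCE MUST BE OF EQUAL LENGTH")
--
--     if len(s1) % 3 !=0:
--         raise ValueError("SEQUENCE LENGTH MUST BE A MULTIPLE OF 3")
--
--     syn = 0
--     nonsyn = 0
--     changes = []
--
--     for i in range(0, len(s1), 3):
--         cod1 = s1[i:i+3]
--         cod2 = s2[i:i+3]
--         if cod1 == cod2: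
--             continue
--         aa1 = translate_codon(cod1)
--         aa2 = translate_codon(cod2)
--         if aa1 == aa2:
--             syn += 1
--             changes.append((i//3 + 1, cod1, cod2, aa1, aa2, "Synonymous"))
--         else:
--             nonsyn += 1
--             changes.append((i//3 + 1, cod1, cod2, aa1, aa2, "non-synonymous"))
--
--     return syn, nonsyn, changes
-- ===== SOURCE B (Python) =====
-- CODON_TABLE = {
--     'ATA':'I','ATC':'I','ATT':'I','ATG':'M',
--     'ACA':'T','ACC':'T','ACG':'T','ACT':'T',
--     'AAC':'N','AAT':'N','AAA':'K','AAG':'K',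
--     'AGC':'S','AGT':'S','AGA':'R','AGG':'R',
--     'CTA':'L','CTC':'L','CTG':'L','CTT':'L',
--     'CCA':'P','CCC':'P','CCG':'P','CCT':'P',
--     'CAC':'H','CAT':'H','CAA':'Q','CAG':'Q',
--     'CGA':'R','CGC':'R','CGG':'R','CGT':'R',
--     'GTA':'V','GTC':'V','GTG':'V','GTT':'V',
--     'GCA':'A','GCC':'A','GCG':'A','GCT':'A',
--     'GAC':'D','GAT':'D','GAA':'E','GAG':'E',
--     'GGA':'G','GGC':'G','GGG':'G','GGT':'G',
--     'TCA':'S','TCC':'S','TCG':'S','TCT':'S',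
--     'TTC':'F','TTT':'F','TTA':'L','TTG':'L',
--     'TAC':'Y','TAT':'Y','TAA':'Stop','TAG':'Stop',
--     'TGC':'C','TGT':'C','TGA':'Stop','TGG':'W'
-- }
--
-- def translate_codon(codon):
--     codon = codon.upper()
--     if len(codon) != 3:
--         return "invalid codon"
--     return CODON_TABLE.get(codon, 'X')
--
-- def count_syn_nonsyn(s1, s2):
--     if len(s1) != len(s2):
--         raise ValueError("SEQUENCE MUST BE OF EQUAL LENGTH")
--     if len(s1) % 3 != 0:
--         raise ValueError("SEQUENCE LENGTH MUST BE A MULTIPLE OF 3")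
--     # Phase 1: character-level scan; collect codon indices containing any
--     # mismatched character (they come out ascending, deduped via `prev`).
--     mism = []
--     prev = -1
--     for i in range(len(s1)):
--         if s1[i] != s2[i]:
--             k = i // 3
--             if k != prev:
--                 mism.append(k)
--                 prev = k
--     # Phase 2: classify only the mismatching codons.
--     syn = 0
--     nonsyn = 0
--     changes = []
--     for k in mism:
--         c1 = s1[3*k:3*k+3]
--         c2 = s2[3*k:3*k+3]
--         a1 = translate_codon(c1)
--         a2 = translate_codon(c2)
--         if a1 == a2:
--             syn += 1
--             changes.append((k + 1, c1, c2, a1, a2, "Synonymous"))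
--         else:
--             nonsyn += 1
--             changes.append((k + 1, c1, c2, a1, a2, "non-synonymous"))
--     return syn, nonsyn, changes
-- ===== Notes on version B (the rewrite author's own statement) =====
-- stated objective: alternative
-- what changed: Replaces A's codon loop (slice every codon pair, compare the slices, classify inline) by a two-phase algorithm: a character-level scan over the zipped sequences that collects the ascending deduplicated list of codon indices containing any mismatched character, followed by a classification pass that slices and translates only those codons.
import Mathlib
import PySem

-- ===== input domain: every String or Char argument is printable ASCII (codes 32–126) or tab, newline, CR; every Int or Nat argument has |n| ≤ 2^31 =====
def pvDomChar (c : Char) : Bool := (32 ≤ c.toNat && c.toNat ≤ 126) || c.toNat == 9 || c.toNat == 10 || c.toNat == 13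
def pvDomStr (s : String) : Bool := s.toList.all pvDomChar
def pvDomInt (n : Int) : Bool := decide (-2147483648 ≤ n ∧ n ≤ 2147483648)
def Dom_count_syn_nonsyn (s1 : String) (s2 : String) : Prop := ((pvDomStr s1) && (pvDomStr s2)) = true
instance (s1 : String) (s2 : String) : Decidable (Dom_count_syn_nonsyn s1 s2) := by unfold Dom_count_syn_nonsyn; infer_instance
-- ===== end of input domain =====

-- B replaces A's codon loop by a two-phase algorithm: a character-level scan collecting the ascending deduplicated codon indices that contain a mismatched character, then a classification pass over only those indices; same return value, objective: alternative.


-- ===== PORT A =====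
def pvCODON_TABLE : PySem.Dict String String := PySem.Dict.ofList [
  ("ATA", "I"), ("ATC", "I"), ("ATT", "I"), ("ATG", "M"),
  ("ACA", "T"), ("ACC", "T"), ("ACG", "T"), ("ACT", "T"),
  ("AAC", "N"), ("AAT", "N"), ("AAA", "K"), ("AAG", "K"),
  ("AGC", "S"), ("AGT", "S"), ("AGA", "R"), ("AGG", "R"),
  ("CTA", "L"), ("CTC", "L"), ("CTG", "L"), ("CTT", "L"),
  ("CCA", "P"), ("CCC", "P"), ("CCG", "P"), ("CCT", "P"),
  ("CAC", "H"), ("CAT", "H"), ("CAA", "Q"), ("CAG", "Q"),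
  ("CGA", "R"), ("CGC", "R"), ("CGG", "R"), ("CGT", "R"),
  ("GTA", "V"), ("GTC", "V"), ("GTG", "V"), ("GTT", "V"),
  ("GCA", "A"), ("GCC", "A"), ("GCG", "A"), ("GCT", "A"),
  ("GAC", "D"), ("GAT", "D"), ("GAA", "E"), ("GAG", "E"),
  ("GGA", "G"), ("GGC", "G"), ("GGG", "G"), ("GGT", "G"),
  ("TCA", "S"), ("TCC", "S"), ("TCG", "S"), ("TCT", "S"),
  ("TTC", "F"), ("TTT", "F"), ("TTA", "L"), ("TTG", "L"),
  ("TAC", "Y"), ("TAT", "Y"), ("TAA", "Stop"), ("TAG", "Stop"),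
  ("TGC", "C"), ("TGT", "C"), ("TGA", "Stop"), ("TGG", "W")]

def translate_codon (codon : String) : String :=
  let codon := PySem.Str.upper codon
  if PySem.Str.len codon ≠ 3 then "invalid codon"
  else pvCODON_TABLE.getD codon "X"

-- A's loop body, named (a literal transcription of the body of A's for-loop)
def pvStepA (s1 s2 : String)
    (acc : Int × Int × (List (Int × String × String × String × String × String))) (i : Int) :
    Int × Int × (List (Int × String × String × String × String × String)) :=
  let syn := acc.1; let nonsyn := acc.2.1; let changes := acc.2.2
  let cod1 := PySem.Str.slice s1 (some i) (some (i + 3))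
  let cod2 := PySem.Str.slice s2 (some i) (some (i + 3))
  if cod1 == cod2 then acc
  else
    let aa1 := translate_codon cod1
    let aa2 := translate_codon cod2
    if aa1 == aa2 then
      (syn + 1, nonsyn, changes ++ [(PySem.Int.floordiv i 3 + 1, cod1, cod2, aa1, aa2, "Synonymous")])
    else
      (syn, nonsyn + 1, changes ++ [(PySem.Int.floordiv i 3 + 1, cod1, cod2, aa1, aa2, "non-synonymous")])

-- Port of A; A's two 'raise' branches are excluded by Pre_count_syn_nonsyn.
def count_syn_nonsyn (s1 : String) (s2 : String) : Int × Int × (List (Int × String × String × String × String × String)) :=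
  (PySem.List.pyRange 0 (PySem.Str.len s1) 3).foldl (pvStepA s1 s2) (0, 0, [])

-- ===== PORT B =====
-- phase-1 loop body: character scan collecting mismatching codon indices (state = (prev, mism))
def pvScanStep (s1 s2 : String) (acc : Int × List Int) (i : Int) : Int × List Int :=
  if PySem.Str.pyGet? s1 i ≠ PySem.Str.pyGet? s2 i then
    let k := PySem.Int.floordiv i 3
    if k ≠ acc.1 then (k, acc.2 ++ [k]) else acc
  else acc

-- phase-2 loop body: classify one mismatching codon index
def pvClassStep (s1 s2 : String)
    (acc : Int × Int × (List (Int × String × String × String × String × String))) (k : Int) :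
    Int × Int × (List (Int × String × String × String × String × String)) :=
  let c1 := PySem.Str.slice s1 (some (3 * k)) (some (3 * k + 3))
  let c2 := PySem.Str.slice s2 (some (3 * k)) (some (3 * k + 3))
  let a1 := translate_codon c1
  let a2 := translate_codon c2
  if a1 == a2 then
    (acc.1 + 1, acc.2.1, acc.2.2 ++ [(k + 1, c1, c2, a1, a2, "Synonymous")])
  else
    (acc.1, acc.2.1 + 1, acc.2.2 ++ [(k + 1, c1, c2, a1, a2, "non-synonymous")])

def count_syn_nonsyn_alt (s1 : String) (s2 : String) : Int × Int × (List (Int × String × String × String × String × String)) :=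
  let mism := ((PySem.List.pyRange 0 (PySem.Str.len s1) 1).foldl (pvScanStep s1 s2) (-1, [])).2
  mism.foldl (pvClassStep s1 s2) (0, 0, [])

-- ===== PRECONDITION & SPEC =====
-- A raises ValueError when the two sequences differ in length or the length is not a multiple of 3; exactly those inputs are excluded (B raises there too).
def Pre_count_syn_nonsyn (s1 : String) (s2 : String) : Prop :=
  PySem.Str.len s1 = PySem.Str.len s2 ∧ PySem.Int.mod (PySem.Str.len s1) 3 = 0
instance (s1 : String) (s2 : String) : Decidable (Pre_count_syn_nonsyn s1 s2) := by unfold Pre_count_syn_nonsyn; infer_instance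
def pvWitness_count_syn_nonsyn : String × String := ("ATGAAA", "ATAAAG")

def Spec_count_syn_nonsyn (s1 : String) (s2 : String) (out : Int × Int × (List (Int × String × String × String × String × String))) : Prop := out = count_syn_nonsyn_alt s1 s2
instance (s1 : String) (s2 : String) (out : Int × Int × (List (Int × String × String × String × String × String))) : Decidable (Spec_count_syn_nonsyn s1 s2 out) := by
  unfold Spec_count_syn_nonsyn
  exact @instDecidableEqProd _ _ _ (fun x y => @instDecidableEqProd _ _ _ (by intro u v; infer_instance) x y) out (count_syn_nonsyn_alt s1 s2)

-- ===== CLAIM (what is proved, stated in full; the proofs are below) =====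
def Claim_equal_count_syn_nonsyn : Prop := ∀ (s1 : String) (s2 : String), Dom_count_syn_nonsyn s1 s2 → Pre_count_syn_nonsyn s1 s2 → Spec_count_syn_nonsyn s1 s2 (count_syn_nonsyn s1 s2)

-- ===== LEMMAS AND PROOFS =====

-- the common reference shape: what both programs report for the (0-based) chunk k
def pvChunk (s1 s2 : String) (k : Nat) : List (Int × String × String × String × String × String) :=
  let c1 := PySem.Str.slice s1 (some (3 * (k : Int))) (some (3 * (k : Int) + 3))
  let c2 := PySem.Str.slice s2 (some (3 * (k : Int))) (some (3 * (k : Int) + 3))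
  if c1 = c2 then []
  else [((k : Int) + 1, c1, c2, translate_codon c1, translate_codon c2,
         if translate_codon c1 = translate_codon c2 then "Synonymous" else "non-synonymous")]

def pvCnt (X : List (Int × String × String × String × String × String)) : Int :=
  (X.countP (fun t => t.2.2.2.2.2 == "Synonymous") : Int)

-- codon-level mismatch, at string-slice granularity (what phase 2 cares about)
def pvDiffB (s1 s2 : String) (k : Nat) : Bool :=
  decide (PySem.Str.slice s1 (some (3 * (k : Int))) (some (3 * (k : Int) + 3)) ≠
          PySem.Str.slice s2 (some (3 * (k : Int))) (some (3 * (k : Int) + 3)))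

-- codon-level mismatch, at character granularity (what phase 1 computes)
def pvKDiff (s1 s2 : String) (k : Nat) : Bool :=
  decide (s1.toList[3 * k]? ≠ s2.toList[3 * k]? ∨ s1.toList[3 * k + 1]? ≠ s2.toList[3 * k + 1]? ∨
          s1.toList[3 * k + 2]? ≠ s2.toList[3 * k + 2]?)

theorem pvRange3 (n : Int) (h0 : 0 ≤ n) (h3 : (3:Int) ∣ n) :
    PySem.List.pyRange 0 n 3 = (List.range (n / 3).toNat).map (fun k : Nat => 3 * (k : Int)) := by
  rw [PySem.List.pyRange_of_pos _ _ (by norm_num)]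
  have he : (if (0:Int) < n then ((n - 0 + 3 - 1) / 3).toNat else 0) = (n / 3).toNat := by
    split_ifs with h <;> omega
  rw [he]
  exact List.map_congr_left fun k _ => by omega

theorem pvFoldA (s1 s2 : String) (L : List Nat) : ∀ (s0 n0 : Int) ch0,
    List.foldl (pvStepA s1 s2) (s0, n0, ch0) (L.map (fun k : Nat => 3 * (k : Int))) =
    (s0 + pvCnt (L.flatMap (pvChunk s1 s2)),
     n0 + (((L.flatMap (pvChunk s1 s2)).length : Int) - pvCnt (L.flatMap (pvChunk s1 s2))),
     ch0 ++ L.flatMap (pvChunk s1 s2)) := by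
  induction L with
  | nil => intro s0 n0 ch0; simp [pvCnt]
  | cons k L ih =>
    intro s0 n0 ch0
    simp only [List.map_cons, List.foldl_cons, List.flatMap_cons]
    by_cases hc : PySem.Str.slice s1 (some (3 * (k : Int))) (some (3 * (k : Int) + 3)) =
                  PySem.Str.slice s2 (some (3 * (k : Int))) (some (3 * (k : Int) + 3))
    · have hstep : pvStepA s1 s2 (s0, n0, ch0) (3 * (k : Int)) = (s0, n0, ch0) := by
        simp [pvStepA, hc]
      rw [hstep, ih]
      simp [pvChunk, hc]
    · by_cases ha : translate_codon (PySem.Str.slice s1 (some (3 * (k : Int))) (some (3 * (k : Int) + 3))) =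
                    translate_codon (PySem.Str.slice s2 (some (3 * (k : Int))) (some (3 * (k : Int) + 3)))
      · have hstep : pvStepA s1 s2 (s0, n0, ch0) (3 * (k : Int)) =
            (s0 + 1, n0, ch0 ++ [((k : Int) + 1,
              PySem.Str.slice s1 (some (3 * (k : Int))) (some (3 * (k : Int) + 3)),
              PySem.Str.slice s2 (some (3 * (k : Int))) (some (3 * (k : Int) + 3)),
              translate_codon (PySem.Str.slice s1 (some (3 * (k : Int))) (some (3 * (k : Int) + 3))),
              translate_codon (PySem.Str.slice s2 (some (3 * (k : Int))) (some (3 * (k : Int) + 3))),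
              "Synonymous")]) := by
          simp [pvStepA, hc, ha]
        rw [hstep, ih]
        simp only [pvChunk, if_neg hc, if_pos ha, pvCnt, List.countP_append, List.countP_cons,
          List.countP_nil, List.length_append, List.length_cons, List.length_nil, Prod.mk.injEq]
        push_cast
        simp [List.append_assoc]
        try omega
      · have hstep : pvStepA s1 s2 (s0, n0, ch0) (3 * (k : Int)) =
            (s0, n0 + 1, ch0 ++ [((k : Int) + 1,
              PySem.Str.slice s1 (some (3 * (k : Int))) (some (3 * (k : Int) + 3)),
              PySem.Str.slice s2 (some (3 * (k : Int))) (some (3 * (k : Int) + 3)),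
              translate_codon (PySem.Str.slice s1 (some (3 * (k : Int))) (some (3 * (k : Int) + 3))),
              translate_codon (PySem.Str.slice s2 (some (3 * (k : Int))) (some (3 * (k : Int) + 3))),
              "non-synonymous")]) := by
          simp [pvStepA, hc, ha]
        rw [hstep, ih]
        simp only [pvChunk, if_neg hc, if_neg ha, pvCnt, List.countP_append, List.countP_cons,
          List.countP_nil, List.length_append, List.length_cons, List.length_nil, Prod.mk.injEq]
        push_cast
        simp [List.append_assoc]
        try omega

theorem pvASide (s1 s2 : String)
    (h3 : PySem.Int.mod (PySem.Str.len s1) 3 = 0) :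
    count_syn_nonsyn s1 s2 =
      (pvCnt ((List.range ((PySem.Str.len s1 / 3).toNat)).flatMap (pvChunk s1 s2)),
       (((List.range ((PySem.Str.len s1 / 3).toNat)).flatMap (pvChunk s1 s2)).length : Int) -
         pvCnt ((List.range ((PySem.Str.len s1 / 3).toNat)).flatMap (pvChunk s1 s2)),
       (List.range ((PySem.Str.len s1 / 3).toNat)).flatMap (pvChunk s1 s2)) := by
  have h0 : 0 ≤ PySem.Str.len s1 := by simp [PySem.Str.len_eq]
  have hd : (3:Int) ∣ PySem.Str.len s1 := (PySem.Int.mod_eq_zero_iff_dvd _ _).mp h3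
  unfold count_syn_nonsyn
  rw [pvRange3 _ h0 hd, pvFoldA s1 s2]
  simp

-- ---- B side, phase 1: the character scan computes exactly the pvKDiff filter ----

theorem pvFloor3 (K j : Nat) (hj : j < 3) : PySem.Int.floordiv ((3 * K + j : Nat) : Int) 3 = (K : Int) := by
  rw [PySem.Int.floordiv_eq_iff_of_pos] <;> push_cast <;> omega

theorem pvStepSkip (s1 s2 : String) (i : Nat) (p : Int) (acc : List Int)
    (h : s1.toList[i]? = s2.toList[i]?) : pvScanStep s1 s2 (p, acc) ((i : Nat) : Int) = (p, acc) := by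
  simp only [pvScanStep, PySem.Str.pyGet?_natCast]
  rw [if_neg (not_not_intro h)]

theorem pvStepHit (s1 s2 : String) (m K : Nat) (p : Int) (acc : List Int)
    (h : s1.toList[m]? ≠ s2.toList[m]?)
    (hfl : PySem.Int.floordiv ((m : Nat) : Int) 3 = (K : Int)) (hp : p ≠ (K : Int)) :
    pvScanStep s1 s2 (p, acc) ((m : Nat) : Int) = ((K : Int), acc ++ [(K : Int)]) := by
  simp only [pvScanStep, PySem.Str.pyGet?_natCast, hfl]
  rw [if_pos h, if_pos (fun e => hp e.symm)]

theorem pvStepHitSame (s1 s2 : String) (m K : Nat) (acc : List Int)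
    (h : s1.toList[m]? ≠ s2.toList[m]?)
    (hfl : PySem.Int.floordiv ((m : Nat) : Int) 3 = (K : Int)) :
    pvScanStep s1 s2 ((K : Int), acc) ((m : Nat) : Int) = ((K : Int), acc) := by
  simp only [pvScanStep, PySem.Str.pyGet?_natCast, hfl]
  rw [if_pos h, if_neg (by simp)]

theorem pvBlock (s1 s2 : String) (K : Nat) (prev : Int) (acc : List Int) (hp : prev < (K : Int)) :
    List.foldl (pvScanStep s1 s2) (prev, acc)
      [((3 * K : Nat) : Int), ((3 * K + 1 : Nat) : Int), ((3 * K + 2 : Nat) : Int)] =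
    if pvKDiff s1 s2 K then ((K : Int), acc ++ [(K : Int)]) else (prev, acc) := by
  have hp' : prev ≠ (K : Int) := by omega
  have f0 : PySem.Int.floordiv ((3 * K : Nat) : Int) 3 = (K : Int) := by
    simpa using pvFloor3 K 0 (by omega)
  have f1 := pvFloor3 K 1 (by omega)
  have f2 := pvFloor3 K 2 (by omega)
  simp only [List.foldl_cons, List.foldl_nil]
  by_cases d0 : s1.toList[3 * K]? = s2.toList[3 * K]? <;>
    by_cases d1 : s1.toList[3 * K + 1]? = s2.toList[3 * K + 1]? <;>
      by_cases d2 : s1.toList[3 * K + 2]? = s2.toList[3 * K + 2]?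
  · rw [pvStepSkip s1 s2 _ _ _ d0, pvStepSkip s1 s2 _ _ _ d1, pvStepSkip s1 s2 _ _ _ d2,
        if_neg (by simp [pvKDiff, d0, d1, d2])]
  · rw [pvStepSkip s1 s2 _ _ _ d0, pvStepSkip s1 s2 _ _ _ d1,
        pvStepHit s1 s2 _ _ _ _ d2 f2 hp', if_pos (by simp [pvKDiff, d2])]
  · rw [pvStepSkip s1 s2 _ _ _ d0, pvStepHit s1 s2 _ _ _ _ d1 f1 hp',
        pvStepSkip s1 s2 _ _ _ d2, if_pos (by simp [pvKDiff, d1])]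
  · rw [pvStepSkip s1 s2 _ _ _ d0, pvStepHit s1 s2 _ _ _ _ d1 f1 hp',
        pvStepHitSame s1 s2 _ _ _ d2 f2, if_pos (by simp [pvKDiff, d1])]
  · rw [pvStepHit s1 s2 _ _ _ _ d0 f0 hp', pvStepSkip s1 s2 _ _ _ d1,
        pvStepSkip s1 s2 _ _ _ d2, if_pos (by simp [pvKDiff, d0])]
  · rw [pvStepHit s1 s2 _ _ _ _ d0 f0 hp', pvStepSkip s1 s2 _ _ _ d1,
        pvStepHitSame s1 s2 _ _ _ d2 f2, if_pos (by simp [pvKDiff, d0])]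
  · rw [pvStepHit s1 s2 _ _ _ _ d0 f0 hp', pvStepHitSame s1 s2 _ _ _ d1 f1,
        pvStepSkip s1 s2 _ _ _ d2, if_pos (by simp [pvKDiff, d0])]
  · rw [pvStepHit s1 s2 _ _ _ _ d0 f0 hp', pvStepHitSame s1 s2 _ _ _ d1 f1,
        pvStepHitSame s1 s2 _ _ _ d2 f2, if_pos (by simp [pvKDiff, d0])]

theorem pvScanMain (s1 s2 : String) : ∀ K : Nat,
    (((List.range (3 * K)).map (fun i : Nat => (i : Int))).foldl (pvScanStep s1 s2) (-1, [])).1 < (K : Int) ∧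
    (((List.range (3 * K)).map (fun i : Nat => (i : Int))).foldl (pvScanStep s1 s2) (-1, [])).2 =
      ((List.range K).filter (pvKDiff s1 s2)).map (fun k : Nat => (k : Int)) := by
  intro K
  induction K with
  | zero => simp
  | succ K ih =>
    have hsplit : List.range (3 * (K + 1)) = List.range (3 * K) ++ [3 * K, 3 * K + 1, 3 * K + 2] := by
      have h : 3 * (K + 1) = (3 * K + 1 + 1) + 1 := by omega
      rw [h, List.range_succ, List.range_succ, List.range_succ]
      simp
    rw [hsplit, List.map_append, List.foldl_append]
    obtain ⟨ih1, ih2⟩ := ih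
    have hpair : ((List.range (3 * K)).map (fun i : Nat => (i : Int))).foldl (pvScanStep s1 s2) (-1, []) =
        ((((List.range (3 * K)).map (fun i : Nat => (i : Int))).foldl (pvScanStep s1 s2) (-1, [])).1,
         ((List.range K).filter (pvKDiff s1 s2)).map (fun k : Nat => (k : Int))) := by
      rw [← ih2]
    rw [hpair, List.map_cons, List.map_cons, List.map_cons, List.map_nil,
        pvBlock s1 s2 K _ _ ih1, List.range_succ, List.filter_append]
    by_cases hd : pvKDiff s1 s2 K
    · rw [if_pos hd]
      refine ⟨by push_cast; omega, ?_⟩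
      simp [hd]
    · rw [if_neg hd]
      refine ⟨by push_cast; omega, ?_⟩
      simp [hd]

-- ---- bounds bridge: character-level mismatch ↔ slice mismatch ----

theorem pvTake3 (l : List Char) (m : Nat) (h : m + 3 ≤ l.length) :
    (l.drop m).take 3 = [l[m], l[m + 1], l[m + 2]] := by
  have htake : ∀ (a b c : Char) (rest : List Char), List.take 3 (a :: b :: c :: rest) = [a, b, c] := by
    intro a b c rest; simp
  rw [List.drop_eq_getElem_cons (show m < l.length by omega),
      List.drop_eq_getElem_cons (show m + 1 < l.length by omega),
      List.drop_eq_getElem_cons (show m + 2 < l.length by omega)]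
  exact htake _ _ _ _

set_option maxHeartbeats 1000000 in
theorem pvKDiff_eq_pvDiffB (s1 s2 : String) (hlen : s1.toList.length = s2.toList.length)
    (k : Nat) (hk : 3 * k + 3 ≤ s1.toList.length) :
    pvKDiff s1 s2 k = pvDiffB s1 s2 k := by
  have harg1 : PySem.Str.slice s1 (some (3 * (k : Int))) (some (3 * (k : Int) + 3)) =
      PySem.Str.slice s1 (some ((3 * k : Nat) : Int)) (some ((3 * k + 3 : Nat) : Int)) := by
    norm_num
  have harg2 : PySem.Str.slice s2 (some (3 * (k : Int))) (some (3 * (k : Int) + 3)) =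
      PySem.Str.slice s2 (some ((3 * k : Nat) : Int)) (some ((3 * k + 3 : Nat) : Int)) := by
    norm_num
  have hs1 : (PySem.Str.slice s1 (some (3 * (k : Int))) (some (3 * (k : Int) + 3))).toList =
      [s1.toList[3 * k], s1.toList[3 * k + 1], s1.toList[3 * k + 2]] := by
    rw [harg1]
    simp only [PySem.Str.toList_slice, PySem.Chars.slice_eq_listSlice, PySem.List.slice_natCast]
    rw [show 3 * k + 3 - 3 * k = 3 from by omega]
    exact pvTake3 _ _ hk
  have hs2 : (PySem.Str.slice s2 (some (3 * (k : Int))) (some (3 * (k : Int) + 3))).toList =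
      [s2.toList[3 * k], s2.toList[3 * k + 1], s2.toList[3 * k + 2]] := by
    rw [harg2]
    simp only [PySem.Str.toList_slice, PySem.Chars.slice_eq_listSlice, PySem.List.slice_natCast]
    rw [show 3 * k + 3 - 3 * k = 3 from by omega]
    exact pvTake3 _ _ (by omega)
  have hiff : (PySem.Str.slice s1 (some (3 * (k : Int))) (some (3 * (k : Int) + 3))) =
      (PySem.Str.slice s2 (some (3 * (k : Int))) (some (3 * (k : Int) + 3))) ↔
      (s1.toList[3 * k]? = s2.toList[3 * k]? ∧ s1.toList[3 * k + 1]? = s2.toList[3 * k + 1]? ∧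
       s1.toList[3 * k + 2]? = s2.toList[3 * k + 2]?) := by
    rw [← String.toList_inj, hs1, hs2]
    simp only [List.cons.injEq, and_true]
    rw [List.getElem?_eq_getElem (by omega), List.getElem?_eq_getElem (by omega),
        List.getElem?_eq_getElem (by omega), List.getElem?_eq_getElem (by omega),
        List.getElem?_eq_getElem (by omega), List.getElem?_eq_getElem (by omega)]
    simp only [Option.some.injEq]
    exact Iff.rfl
  simp only [pvKDiff, pvDiffB, decide_eq_decide, ne_eq]
  rw [hiff, not_and_or, not_and_or]

-- ---- B side, phase 2 ----

theorem pvFoldB (s1 s2 : String) (L : List Nat) (hL : ∀ k ∈ L, pvDiffB s1 s2 k = true) :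
    ∀ (s0 n0 : Int) ch0,
    List.foldl (pvClassStep s1 s2) (s0, n0, ch0) (L.map (fun k : Nat => (k : Int))) =
    (s0 + pvCnt (L.flatMap (pvChunk s1 s2)),
     n0 + (((L.flatMap (pvChunk s1 s2)).length : Int) - pvCnt (L.flatMap (pvChunk s1 s2))),
     ch0 ++ L.flatMap (pvChunk s1 s2)) := by
  induction L with
  | nil => intro s0 n0 ch0; simp [pvCnt]
  | cons k L ih =>
    intro s0 n0 ch0
    have hk : pvDiffB s1 s2 k = true := hL k (by simp)
    have hc : ¬ (PySem.Str.slice s1 (some (3 * (k : Int))) (some (3 * (k : Int) + 3)) =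
                 PySem.Str.slice s2 (some (3 * (k : Int))) (some (3 * (k : Int) + 3))) := by
      simpa [pvDiffB] using hk
    have ih' := ih (fun x hx => hL x (by simp [hx]))
    simp only [List.map_cons, List.foldl_cons, List.flatMap_cons]
    by_cases ha : translate_codon (PySem.Str.slice s1 (some (3 * (k : Int))) (some (3 * (k : Int) + 3))) =
                  translate_codon (PySem.Str.slice s2 (some (3 * (k : Int))) (some (3 * (k : Int) + 3)))
    · have hstep : pvClassStep s1 s2 (s0, n0, ch0) ((k : Int)) =
          (s0 + 1, n0, ch0 ++ [((k : Int) + 1,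
            PySem.Str.slice s1 (some (3 * (k : Int))) (some (3 * (k : Int) + 3)),
            PySem.Str.slice s2 (some (3 * (k : Int))) (some (3 * (k : Int) + 3)),
            translate_codon (PySem.Str.slice s1 (some (3 * (k : Int))) (some (3 * (k : Int) + 3))),
            translate_codon (PySem.Str.slice s2 (some (3 * (k : Int))) (some (3 * (k : Int) + 3))),
            "Synonymous")]) := by
        simp [pvClassStep, ha]
      rw [hstep, ih']
      simp only [pvChunk, if_neg hc, if_pos ha, pvCnt, List.countP_append, List.countP_cons,
        List.countP_nil, List.length_append, List.length_cons, List.length_nil, Prod.mk.injEq]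
      push_cast
      simp [List.append_assoc]
      try omega
    · have hstep : pvClassStep s1 s2 (s0, n0, ch0) ((k : Int)) =
          (s0, n0 + 1, ch0 ++ [((k : Int) + 1,
            PySem.Str.slice s1 (some (3 * (k : Int))) (some (3 * (k : Int) + 3)),
            PySem.Str.slice s2 (some (3 * (k : Int))) (some (3 * (k : Int) + 3)),
            translate_codon (PySem.Str.slice s1 (some (3 * (k : Int))) (some (3 * (k : Int) + 3))),
            translate_codon (PySem.Str.slice s2 (some (3 * (k : Int))) (some (3 * (k : Int) + 3))),
            "non-synonymous")]) := by
        simp [pvClassStep, ha]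
      rw [hstep, ih']
      simp only [pvChunk, if_neg hc, if_neg ha, pvCnt, List.countP_append, List.countP_cons,
        List.countP_nil, List.length_append, List.length_cons, List.length_nil, Prod.mk.injEq]
      push_cast
      simp [List.append_assoc]
      try omega

-- the filter is invisible to the flatMap: chunks of non-mismatching indices are empty
theorem pvFilterFlat (s1 s2 : String) (L : List Nat) :
    (L.filter (pvDiffB s1 s2)).flatMap (pvChunk s1 s2) = L.flatMap (pvChunk s1 s2) := by
  induction L with
  | nil => rfl
  | cons k L ih =>
    by_cases hd : pvDiffB s1 s2 k
    · simp [List.filter_cons, hd, ih]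
    · have hc : pvChunk s1 s2 k = [] := by
        have : PySem.Str.slice s1 (some (3 * (k : Int))) (some (3 * (k : Int) + 3)) =
               PySem.Str.slice s2 (some (3 * (k : Int))) (some (3 * (k : Int) + 3)) := by
          by_contra hne
          exact hd (by simp [pvDiffB, hne])
        simp [pvChunk, this]
      simp [List.filter_cons, hd, ih, hc]

theorem pvBSide (s1 s2 : String) (h1 : PySem.Str.len s1 = PySem.Str.len s2)
    (h3 : PySem.Int.mod (PySem.Str.len s1) 3 = 0) :
    count_syn_nonsyn_alt s1 s2 =
      (pvCnt ((List.range ((PySem.Str.len s1 / 3).toNat)).flatMap (pvChunk s1 s2)),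
       (((List.range ((PySem.Str.len s1 / 3).toNat)).flatMap (pvChunk s1 s2)).length : Int) -
         pvCnt ((List.range ((PySem.Str.len s1 / 3).toNat)).flatMap (pvChunk s1 s2)),
       (List.range ((PySem.Str.len s1 / 3).toNat)).flatMap (pvChunk s1 s2)) := by
  have hlen : s1.toList.length = s2.toList.length := by
    have h := h1; simp only [PySem.Str.len_eq] at h; exact_mod_cast h
  have hdvd : 3 ∣ s1.toList.length := by
    have hd : (3:Int) ∣ PySem.Str.len s1 := (PySem.Int.mod_eq_zero_iff_dvd _ _).mp h3
    simp only [PySem.Str.len_eq] at hd; exact_mod_cast hd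
  obtain ⟨K, hK⟩ : ∃ K, s1.toList.length = 3 * K := ⟨s1.toList.length / 3, by omega⟩
  have hKt : ((PySem.Str.len s1 / 3)).toNat = K := by
    simp only [PySem.Str.len_eq]; omega
  rw [hKt]
  simp only [count_syn_nonsyn_alt, PySem.Str.len_eq]
  rw [hK, PySem.List.pyRange_zero_natCast, (pvScanMain s1 s2 K).2]
  have hfeq : (List.range K).filter (pvKDiff s1 s2) = (List.range K).filter (pvDiffB s1 s2) := by
    apply List.filter_congr
    intro k hkmem
    have hkK : k < K := by simpa using hkmem
    exact pvKDiff_eq_pvDiffB s1 s2 hlen k (by omega)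
  rw [hfeq, pvFoldB s1 s2 _ (fun k hk => (List.mem_filter.mp hk).2), pvFilterFlat]
  simp

-- ===== VERDICT (by name: the statement is the Claim_ definition above) =====
theorem count_syn_nonsyn_spec : Claim_equal_count_syn_nonsyn := by
  intro s1 s2 _ hpre
  unfold Spec_count_syn_nonsyn
  rw [pvASide s1 s2 hpre.2, pvBSide s1 s2 hpre.1 hpre.2]
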